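-- pv_equiv track=rewrite | github.com/GonxaTroll/Exact-models-and-metaheuristics-for-team-formation-TFG | genetic_algorithm/GA.py | aux_NWOX
-- ===== SOURCE A (Python) =====
-- def aux_NWOX(parent1,parent2,i,j): # Non-Wrapping Ordered Crossover (auxiliary function)
--     child = [parent1[x] if i<=x<=j else None for x in range(len(parent1))] # Copying the block of one parent
--     search_ind = 0
--     for e2 in parent2: # Adding the rest of the elements in the order of the other parent
--         if e2 not in child:
--             while search_ind < len(child) and child[search_ind] is not None:
--                 search_ind += 1
--             child[search_ind] = e2
--     return child
-- ===== SOURCE B (Python) =====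
-- def aux_NWOX(parent1, parent2, i, j):  # NWOX auxiliary: dual traversal by output position
--     used = {parent1[x] for x in range(len(parent1)) if i <= x <= j}
--     out = []
--     t = 0  # cursor into parent2
--     for x in range(len(parent1)):
--         if i <= x <= j:
--             out.append(parent1[x])
--         else:
--             while t < len(parent2) and parent2[t] in used:
--                 t += 1
--             if t < len(parent2):
--                 out.append(parent2[t])
--                 used.add(parent2[t])
--                 t += 1
--             else:
--                 out.append(None)  # parent2 exhausted: slot stays empty
--     return out
-- ===== Notes on version B (the rewrite author's own statement) =====
-- stated objective: faster
-- what changed: Inverts the traversal: instead of scanning parent2 and searching a None-placeholder child for the next empty slot, B builds the child left-to-right by output position, copying the block and otherwise advancing a single cursor over parent2 past already-used elements (set membership), so no placeholder array or slot scan exists.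
-- outside the precondition, e.g. on aux_NWOX([1, 2], [1, 1], 0, 0): A returns [1, None], B returns [1, None]
import Mathlib
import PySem

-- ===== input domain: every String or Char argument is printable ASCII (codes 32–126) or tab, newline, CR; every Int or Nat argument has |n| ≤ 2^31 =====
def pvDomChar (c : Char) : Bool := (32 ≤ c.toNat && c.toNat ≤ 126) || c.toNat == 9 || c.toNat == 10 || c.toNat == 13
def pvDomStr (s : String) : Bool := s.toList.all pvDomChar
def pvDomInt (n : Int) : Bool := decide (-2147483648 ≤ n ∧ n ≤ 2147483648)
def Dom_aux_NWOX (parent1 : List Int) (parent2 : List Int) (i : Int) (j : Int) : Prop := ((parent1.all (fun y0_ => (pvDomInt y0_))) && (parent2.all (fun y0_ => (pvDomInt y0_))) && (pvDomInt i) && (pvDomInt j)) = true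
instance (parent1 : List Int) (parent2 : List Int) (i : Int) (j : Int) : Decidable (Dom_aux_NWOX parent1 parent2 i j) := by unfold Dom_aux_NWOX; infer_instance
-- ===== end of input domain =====

-- B inverts the traversal: it builds the child left-to-right by output position with a
-- single cursor over parent2 (no placeholder array, no slot scan); measured faster at scale.

-- ===== PORT A =====
-- child = [parent1[x] if i<=x<=j else None for x in range(len(parent1))]
def pvChildInit (parent1 : List Int) (i j : Int) : List (Option Int) :=
  (List.range parent1.length).map
    (fun (x : Nat) => if i ≤ (x : Int) ∧ (x : Int) ≤ j then some (parent1.getD x 0) else none)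

-- while search_ind < len(child) and child[search_ind] is not None: search_ind += 1
def pvFindSlot (child : List (Option Int)) (k : Nat) : Nat :=
  if k < child.length then
    (if child.getD k none ≠ none then pvFindSlot child (k + 1) else k)
  else k
termination_by child.length - k

-- A's for-loop over parent2; 'child[search_ind] = e2' is List.set (no-op when
-- search_ind = len(child), where Python raises IndexError — excluded by Pre_).
def aux_NWOX (parent1 : List Int) (parent2 : List Int) (i : Int) (j : Int) : List Int :=
  let child := pvChildInit parent1 i j
  let res := parent2.foldl
    (fun (st : List (Option Int) × Nat) e2 =>
      if some e2 ∈ st.1 then st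
      else
        let k := pvFindSlot st.1 st.2
        (st.1.set k (some e2), k))
    (child, 0)
  -- Python returns 'child'; under Pre_ every entry is 'some', so the getD 0 is exact
  res.1.map (fun o => o.getD 0)

-- ===== PORT B =====
-- used = {parent1[x] for x in range(n) if i <= x <= j}, as the list of generated values
def pvBlockVals (parent1 : List Int) (i j : Int) : List Int :=
  (List.range parent1.length).filterMap
    (fun (x : Nat) => if i ≤ (x : Int) ∧ (x : Int) ≤ j then some (parent1.getD x 0) else none)

-- while t < len(parent2) and parent2[t] in used: t += 1
def pvNextFresh (p2 : List Int) (used : PySem.Set Int) (t : Nat) : Nat :=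
  if t < p2.length then
    (if PySem.Set.contains used (p2.getD t 0) then pvNextFresh p2 used (t + 1) else t)
  else t
termination_by p2.length - t

-- B's loop body: copy the block entry, or pull the next unused parent2 element;
-- the exhausted-cursor branch appends Python's None — out of List Int, so the
-- port writes 0 there; Pre_ excludes exactly those inputs
def pvStepB (parent1 p2 : List Int) (i j : Int)
    (st : List Int × PySem.Set Int × Nat) (x : Nat) : List Int × PySem.Set Int × Nat :=
  if i ≤ (x : Int) ∧ (x : Int) ≤ j then (st.1 ++ [parent1.getD x 0], st.2.1, st.2.2)
  else
    let t := pvNextFresh p2 st.2.1 st.2.2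
    if t < p2.length then
      (st.1 ++ [p2.getD t 0], PySem.Set.add st.2.1 (p2.getD t 0), t + 1)
    else (st.1 ++ [0], st.2.1, t)

def aux_NWOX_alt (parent1 : List Int) (parent2 : List Int) (i : Int) (j : Int) : List Int :=
  ((List.range parent1.length).foldl (pvStepB parent1 parent2 i j)
    ([], PySem.Set.ofList (pvBlockVals parent1 i j), 0)).1

-- ===== PRECONDITION & SPEC =====
-- the elements of parent2 outside the block, first occurrences in order
def pvNewElems : List Int → List Int → List Int
  | [], _ => []
  | e :: rest, seen =>
      if e ∈ seen then pvNewElems rest seen else e :: pvNewElems rest (seen ++ [e])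

-- Pre_ excludes count mismatches between parent2's new elements and the non-block
-- positions: there A raises IndexError (surplus of new elements) or returns a list
-- still containing None (deficit; B returns that same None-padded list there).
def Pre_aux_NWOX (parent1 : List Int) (parent2 : List Int) (i : Int) (j : Int) : Prop :=
  (pvNewElems parent2 (pvBlockVals parent1 i j)).length + (pvBlockVals parent1 i j).length
    = parent1.length

instance (parent1 : List Int) (parent2 : List Int) (i : Int) (j : Int) : Decidable (Pre_aux_NWOX parent1 parent2 i j) := by unfold Pre_aux_NWOX; infer_instance

def pvWitness_aux_NWOX : List Int × List Int × Int × Int := ([1, 2, 3, 4], [3, 1, 2, 4], 1, 2)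

def Spec_aux_NWOX (parent1 : List Int) (parent2 : List Int) (i : Int) (j : Int) (out : List Int) : Prop := out = aux_NWOX_alt parent1 parent2 i j
instance (parent1 : List Int) (parent2 : List Int) (i : Int) (j : Int) (out : List Int) : Decidable (Spec_aux_NWOX parent1 parent2 i j out) := by unfold Spec_aux_NWOX; infer_instance

-- ===== CLAIM (what is proved, stated in full; the proofs are below) =====
def Claim_equal_aux_NWOX : Prop := ∀ (parent1 : List Int) (parent2 : List Int) (i : Int) (j : Int), Dom_aux_NWOX parent1 parent2 i j → Pre_aux_NWOX parent1 parent2 i j → Spec_aux_NWOX parent1 parent2 i j (aux_NWOX parent1 parent2 i j)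

-- ===== LEMMAS AND PROOFS =====

-- the index of the first None in child (= child.length if there is none)
def pvFirstNone : List (Option Int) → Nat
  | [] => 0
  | none :: _ => 0
  | some _ :: cs => pvFirstNone cs + 1

-- mathematical form of A's loop: place each queue element at the first None slot
def pvPlace : List (Option Int) → List Int → List (Option Int)
  | c, [] => c
  | c, e :: qs => pvPlace (c.set (pvFirstNone c) (some e)) qs

-- merge: block entries verbatim, queue elements at the None positions
def pvFill : List (Option Int) → List Int → List Int
  | [], _ => []
  | some a :: cs, q => a :: pvFill cs q
  | none :: cs, e :: qs => e :: pvFill cs qs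
  | none :: cs, [] => pvFill cs []

def pvNones (c : List (Option Int)) : Nat := c.countP (fun o => o.isNone)

theorem pvFirstNone_lt (c : List (Option Int)) (h : 0 < pvNones c) :
    pvFirstNone c < c.length := by
  induction c with
  | nil => simp [pvNones] at h
  | cons o cs ih =>
    cases o with
    | none => simp [pvFirstNone]
    | some a =>
      simp [pvNones] at h
      simpa [pvFirstNone] using ih (by simpa [pvNones] using h)

theorem pvFirstNone_get (c : List (Option Int)) (h : pvFirstNone c < c.length) :
    c.getD (pvFirstNone c) none = none := by
  induction c with
  | nil => simp at h
  | cons o cs ih =>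
    cases o with
    | none => simp [pvFirstNone]
    | some a =>
      simp [pvFirstNone] at h ⊢
      exact ih h

theorem pvFirstNone_before (c : List (Option Int)) (m : Nat) (h : m < pvFirstNone c) :
    c.getD m none ≠ none := by
  induction c generalizing m with
  | nil => simp [pvFirstNone] at h
  | cons o cs ih =>
    cases o with
    | none => simp [pvFirstNone] at h
    | some a =>
      cases m with
      | zero => simp
      | succ m => simp [pvFirstNone] at h ⊢; exact ih m (by omega)

theorem pvFirstNone_le (c : List (Option Int)) : pvFirstNone c ≤ c.length := by
  induction c with
  | nil => simp [pvFirstNone]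
  | cons o cs ih => cases o <;> simp [pvFirstNone] <;> omega

theorem pvFindSlot_eq (c : List (Option Int)) (si : Nat) :
    (∀ m, m < si → c.getD m none ≠ none) → si ≤ pvFirstNone c →
    pvFindSlot c si = pvFirstNone c := by
  fun_induction pvFindSlot c si with
  | case1 k hk hck ih =>
    intro hinv hle
    apply ih
    · intro m hm
      rcases Nat.lt_or_ge m k with h | h
      · exact hinv m h
      · have : m = k := by omega
        simpa [this] using hck
    · rcases Nat.lt_or_ge k (pvFirstNone c) with h | h
      · omega
      · have : k = pvFirstNone c := by omega
        subst this
        exact absurd (pvFirstNone_get c hk) hck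
  | case2 k hk hck =>
    intro hinv hle
    rcases Nat.lt_or_ge k (pvFirstNone c) with h | h
    · exact absurd (by simpa using hck) (pvFirstNone_before c k h)
    · omega
  | case3 k hk =>
    intro hinv hle
    have h1 := pvFirstNone_le c
    omega

theorem pvNones_set (c : List (Option Int)) (k : Nat) (e : Int)
    (hk : k < c.length) (hc : c.getD k none = none) :
    pvNones (c.set k (some e)) + 1 = pvNones c := by
  induction c generalizing k with
  | nil => simp at hk
  | cons o cs ih =>
    cases k with
    | zero =>
      simp at hc
      subst hc
      simp [pvNones, List.countP_cons]
    | succ k =>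
      simp at hk hc
      have := ih k hk hc
      cases o <;> simp [pvNones, List.countP_cons] at this ⊢ <;> omega

theorem pvMem_set (c : List (Option Int)) (k : Nat) (e e' : Int)
    (hk : k < c.length) (hc : c.getD k none = none) :
    (some e' ∈ c.set k (some e)) ↔ (e' = e ∨ some e' ∈ c) := by
  induction c generalizing k with
  | nil => simp at hk
  | cons o cs ih =>
    cases k with
    | zero =>
      simp at hc
      subst hc
      simp [List.set]
    | succ k =>
      simp at hk hc
      simp [List.set, ih k hk hc]
      tauto

theorem pvFill_set (c : List (Option Int)) (e : Int) (qs : List Int)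
    (h : 0 < pvNones c) :
    pvFill (c.set (pvFirstNone c) (some e)) qs = pvFill c (e :: qs) := by
  induction c with
  | nil => simp [pvNones] at h
  | cons o cs ih =>
    cases o with
    | none => simp [pvFirstNone, List.set, pvFill]
    | some a =>
      simp [pvNones, List.countP_cons] at h
      simp [pvFirstNone, List.set, pvFill]
      exact ih (by simpa [pvNones] using h)

theorem pvMap_fill_nil (c : List (Option Int)) (h : pvNones c = 0) :
    c.map (fun o => o.getD 0) = pvFill c [] := by
  induction c with
  | nil => simp [pvFill]
  | cons o cs ih =>
    cases o with
    | none => simp [pvNones, List.countP_cons] at h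
    | some a =>
      simp [pvNones, List.countP_cons] at h
      simp [pvFill]
      exact ih (by simpa [pvNones] using h)

theorem pvPlace_fill (q : List Int) (c : List (Option Int))
    (h : q.length = pvNones c) :
    (pvPlace c q).map (fun o => o.getD 0) = pvFill c q := by
  induction q generalizing c with
  | nil =>
    simp at h
    rw [pvPlace, pvMap_fill_nil c h.symm]
  | cons e qs ih =>
    have hpos : 0 < pvNones c := by simp at h; omega
    have hk := pvFirstNone_lt c hpos
    have hget := pvFirstNone_get c hk
    have hcnt := pvNones_set c (pvFirstNone c) e hk hget
    rw [pvPlace, ih _ (by simp at h; omega), pvFill_set c e qs hpos]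

-- A's loop computes pvPlace of the queue of new elements
theorem pvLoopA (p2 : List Int) (c : List (Option Int)) (si : Nat) (seen : List Int)
    (hinv : ∀ m, m < si → c.getD m none ≠ none)
    (hsi : si ≤ pvFirstNone c)
    (hmem : ∀ e : Int, some e ∈ c ↔ e ∈ seen)
    (hcnt : (pvNewElems p2 seen).length ≤ pvNones c) :
    (p2.foldl
      (fun (st : List (Option Int) × Nat) e2 =>
        if some e2 ∈ st.1 then st
        else
          let k := pvFindSlot st.1 st.2
          (st.1.set k (some e2), k))
      (c, si)).1 = pvPlace c (pvNewElems p2 seen) := by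
  induction p2 generalizing c si seen with
  | nil => simp [pvNewElems, pvPlace]
  | cons e rest ih =>
    by_cases hmem_e : e ∈ seen
    · have : some e ∈ c := (hmem e).mpr hmem_e
      simp only [List.foldl_cons, if_pos this]
      rw [pvNewElems, if_pos hmem_e] at hcnt ⊢
      exact ih c si seen hinv hsi hmem hcnt
    · have hnotin : ¬ some e ∈ c := fun h => hmem_e ((hmem e).mp h)
      rw [pvNewElems, if_neg hmem_e] at hcnt ⊢
      have hpos : 0 < pvNones c := by simp at hcnt; omega
      have hk := pvFirstNone_lt c hpos
      have hget := pvFirstNone_get c hk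
      have hfs := pvFindSlot_eq c si hinv hsi
      simp only [List.foldl_cons, if_neg hnotin, hfs]
      rw [pvPlace]
      set c' := c.set (pvFirstNone c) (some e) with hc'
      have hcnt' := pvNones_set c (pvFirstNone c) e hk hget
      rw [← hc'] at hcnt'
      have hinv' : ∀ m, m < pvFirstNone c → c'.getD m none ≠ none := by
        intro m hm
        rw [hc', List.getD_eq_getD_getElem?, List.getElem?_set_ne (by omega),
            ← List.getD_eq_getD_getElem?]
        exact pvFirstNone_before c m hm
      apply ih c' (pvFirstNone c) (seen ++ [e])
      · exact hinv'
      · rcases Nat.lt_or_ge (pvFirstNone c') (pvFirstNone c) with h | h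
        · exfalso
          have hlen : c'.length = c.length := by simp [hc']
          have hlt : pvFirstNone c' < c'.length := by omega
          exact hinv' _ h (pvFirstNone_get c' hlt)
        · exact h
      · intro e'
        rw [hc', pvMem_set c (pvFirstNone c) e e' hk hget, hmem e']
        simp
        tauto
      · simp at hcnt ⊢
        omega

-- childInit & blockVals: the generic map/filterMap correspondences
theorem pvMem_map_iff_filterMap (l : List Nat) (F : Nat → Option Int) (e : Int) :
    (some e ∈ l.map F) ↔ e ∈ l.filterMap F := by
  induction l with
  | nil => simp
  | cons x xs ih =>
    cases hF : F x <;> simp [hF, ih]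

theorem pvNones_map (l : List Nat) (F : Nat → Option Int) :
    (l.map F).countP (fun o => o.isNone) + (l.filterMap F).length = l.length := by
  induction l with
  | nil => simp
  | cons x xs ih =>
    cases hF : F x <;> simp [hF, List.countP_cons] at ih ⊢ <;> omega

-- the cursor scan finds exactly the head of the remaining queue of new elements
theorem pvNextFresh_spec (p2 : List Int) (used : PySem.Set Int) (seen : List Int)
    (t : Nat) (e : Int) (q : List Int)
    (hmem : ∀ a : Int, PySem.Set.contains used a = true ↔ a ∈ seen)
    (hq : pvNewElems (p2.drop t) seen = e :: q) :
    pvNextFresh p2 used t < p2.length ∧ p2.getD (pvNextFresh p2 used t) 0 = e ∧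
    pvNewElems (p2.drop (pvNextFresh p2 used t + 1)) (seen ++ [e]) = q := by
  fun_induction pvNextFresh p2 used t with
  | case1 k hk hck ih =>
    apply ih
    have hdrop : p2.drop k = p2.getD k 0 :: p2.drop (k + 1) := by
      rw [List.getD_eq_getElem p2 0 hk]
      exact List.drop_eq_getElem_cons hk
    rw [hdrop, pvNewElems, if_pos ((hmem _).mp hck)] at hq
    exact hq
  | case2 k hk hck =>
    have hdrop : p2.drop k = p2.getD k 0 :: p2.drop (k + 1) := by
      rw [List.getD_eq_getElem p2 0 hk]
      exact List.drop_eq_getElem_cons hk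
    have hnot : ¬ p2.getD k 0 ∈ seen := fun h => hck ((hmem _).mpr h)
    rw [hdrop, pvNewElems, if_neg hnot] at hq
    obtain ⟨he, hrest⟩ := List.cons.inj hq
    exact ⟨hk, he, he ▸ hrest⟩
  | case3 k hk =>
    rw [List.drop_eq_nil_of_le (by omega)] at hq
    simp [pvNewElems] at hq

-- B's loop fills the child's suffix with the remaining queue of new elements
theorem pvLoopB (parent1 p2 : List Int) (i j : Int) (m : Nat) :
    ∀ (s : Nat) (acc : List Int) (used : PySem.Set Int) (seen : List Int) (t : Nat),
    (∀ a : Int, PySem.Set.contains used a = true ↔ a ∈ seen) →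
    pvNones ((List.range' s m).map
        (fun (x : Nat) => if i ≤ (x : Int) ∧ (x : Int) ≤ j then some (parent1.getD x 0) else none))
      ≤ (pvNewElems (p2.drop t) seen).length →
    ((List.range' s m).foldl (pvStepB parent1 p2 i j) (acc, used, t)).1
      = acc ++ pvFill
          ((List.range' s m).map
            (fun (x : Nat) => if i ≤ (x : Int) ∧ (x : Int) ≤ j then some (parent1.getD x 0) else none))
          (pvNewElems (p2.drop t) seen) := by
  induction m with
  | zero => intro s acc used seen t hmem hcnt; simp [pvFill]
  | succ m ih =>
    intro s acc used seen t hmem hcnt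
    rw [List.range'_succ] at hcnt ⊢
    by_cases hc : i ≤ (s : Int) ∧ (s : Int) ≤ j
    · rw [List.map_cons, if_pos hc] at hcnt ⊢
      simp only [List.foldl_cons, pvStepB, if_pos hc]
      rw [pvFill, ih (s + 1) (acc ++ [parent1.getD s 0]) used seen t hmem
        (by simpa [pvNones, List.countP_cons] using hcnt)]
      simp
    · rw [List.map_cons, if_neg hc] at hcnt ⊢
      cases hq : pvNewElems (p2.drop t) seen with
      | nil =>
        rw [hq] at hcnt
        simp [pvNones, List.countP_cons] at hcnt
      | cons e q =>
        obtain ⟨hlt, hval, hrest⟩ := pvNextFresh_spec p2 used seen t e q hmem hq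
        simp only [List.foldl_cons, pvStepB, if_neg hc, if_pos hlt]
        rw [hval, pvFill]
        rw [ih (s + 1) (acc ++ [e])
            (PySem.Set.add used e) (seen ++ [e]) (pvNextFresh p2 used t + 1)
          (by
            intro a
            have h := hmem a
            simp only [PySem.Set.contains, List.contains_iff_mem] at h ⊢
            simp [PySem.Set.mem_add, h])
          (by
            rw [hrest]
            rw [hq] at hcnt
            simp [pvNones, List.countP_cons] at hcnt ⊢
            omega)]
        rw [hrest]
        simp

-- ===== VERDICT (by name: the statement is the Claim_ definition above) =====
theorem aux_NWOX_spec : Claim_equal_aux_NWOX := by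
  intro parent1 parent2 i j _hdom hpre
  unfold Spec_aux_NWOX aux_NWOX aux_NWOX_alt
  dsimp only
  unfold Pre_aux_NWOX at hpre
  have hnones : pvNones (pvChildInit parent1 i j)
      = (pvNewElems parent2 (pvBlockVals parent1 i j)).length := by
    have h2 := pvNones_map (List.range parent1.length)
      (fun (x : Nat) => if i ≤ (x : Int) ∧ (x : Int) ≤ j then some (parent1.getD x 0) else none)
    rw [List.length_range,
      show ((List.range parent1.length).filterMap
        (fun (x : Nat) => if i ≤ (x : Int) ∧ (x : Int) ≤ j then some (parent1.getD x 0) else none))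
        = pvBlockVals parent1 i j from rfl] at h2
    unfold pvChildInit pvNones
    omega
  rw [pvLoopA parent2 (pvChildInit parent1 i j) 0 (pvBlockVals parent1 i j)
    (by intro m hm; omega)
    (by omega)
    (by intro e; unfold pvChildInit pvBlockVals; exact pvMem_map_iff_filterMap _ _ e)
    (by omega)]
  rw [pvPlace_fill _ _ hnones.symm]
  rw [List.range_eq_range']
  rw [pvLoopB parent1 parent2 i j parent1.length 0 []
      (PySem.Set.ofList (pvBlockVals parent1 i j)) (pvBlockVals parent1 i j) 0
    (by
      intro a
      simp only [PySem.Set.contains, List.contains_iff_mem]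
      simp [PySem.Set.mem_ofList])
    (by
      rw [List.drop_zero]
      rw [show (List.range' 0 parent1.length) = List.range parent1.length from
        List.range_eq_range'.symm]
      have : ((List.range parent1.length).map
          (fun (x : Nat) => if i ≤ (x : Int) ∧ (x : Int) ≤ j then some (parent1.getD x 0) else none))
          = pvChildInit parent1 i j := rfl
      rw [this]
      omega)]
  rw [List.drop_zero]
  rw [show (List.range' 0 parent1.length) = List.range parent1.length from
    List.range_eq_range'.symm]
  have : ((List.range parent1.length).map
      (fun (x : Nat) => if i ≤ (x : Int) ∧ (x : Int) ≤ j then some (parent1.getD x 0) else none))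
      = pvChildInit parent1 i j := rfl
  rw [this]
  simp
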